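-- pv_equiv track=rewrite | github.com/WhiteGobo/collectionforstrickkram | createcloth/strickgraph/helper_topology.py | neighbournode_clockwise
-- ===== SOURCE A (Python) =====
-- from typing import Iterable, Dict, Hashable, Iterator, Tuple
-- import itertools as it
--
-- def neighbournode_clockwise( node, upneighbours, downneighbours, \
--                                     leftneighbour, rightneighbour, \
--                                     startdirection, nodetoside, \
--                                     rows, rowindex=None ) \
--                                     -> Iterator[ Tuple[ Hashable, str ] ]:
--     """Sort neighbours clockwise, starting with given startdirection. Binds
--     to each neighbour the walkdirection as string
--     """
--     assert startdirection  in ( "left", "right", "up", "down" )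
--     if rowindex is None:
--         rowindex = [ i for i, line in enumerate(rows) if node in line ][0]
--     ups = list( upneighbours.get( node, []) )
--     right = rightneighbour.get( node, None )
--     rights = [right] if right is not None else []
--     downs = list( downneighbours.get( node, []) )
--     left = leftneighbour.get( node, None)
--     lefts = [left] if left is not None else []
--     if nodetoside[ node ] == "left":
--         if ups:
--             ups.sort( reverse=True, key=rows[ rowindex+1 ].index )
--         if downs:
--             downs.sort( reverse=False, key=rows[ rowindex-1 ].index )
--     else:
--         if ups:
--             ups.sort( reverse=False, key=rows[ rowindex+1 ].index )
--         if downs: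
--             downs.sort( reverse=True, key=rows[ rowindex-1 ].index )
--
--     d_lefts = ("left" for i in lefts)
--     d_rights = ("right" for i in rights)
--     d_ups = ("up" for i in ups)
--     d_downs = ("down" for i in downs)
--     if startdirection == "up":
--         nodes = it.chain( lefts, ups, rights, downs )
--         direction = it.chain( d_lefts, d_ups, d_rights, d_downs )
--     elif startdirection == "right":
--         nodes = it.chain( ups, rights, downs, lefts )
--         direction = it.chain( d_ups, d_rights, d_downs, d_lefts )
--     elif startdirection == "down":
--         nodes = it.chain( rights, downs, lefts, ups )
--         direction = it.chain( d_rights, d_downs, d_lefts, d_ups )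
--     else:
--         nodes = it.chain( downs, lefts, ups, rights )
--         direction = it.chain( d_downs, d_lefts, d_ups, d_rights )
--     return zip( nodes, direction )
-- ===== SOURCE B (Python) =====
-- def neighbournode_clockwise(node, upneighbours, downneighbours,
--                             leftneighbour, rightneighbour,
--                             startdirection, nodetoside,
--                             rows, rowindex=None):
--     """One global stable sort: every neighbour gets a composite clockwise key
--     (segment offset from startdirection, signed within-row position) and a
--     direction label; a single keyed sort replaces per-segment sorts plus the
--     four-way dispatch."""
--     if rowindex is None:
--         rowindex = next(i for i, line in enumerate(rows) if node in line)
--     rev = nodetoside[node] == "left"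
--     start = {"up": 0, "right": 1, "down": 2, "left": 3}[startdirection]
--     pairs = []
--     l = leftneighbour.get(node)
--     if l is not None:
--         pairs.append(((0 - start) % 4, 0, l, "left"))
--     for n in upneighbours.get(node, ()):
--         k = rows[rowindex + 1].index(n)
--         pairs.append(((1 - start) % 4, -k if rev else k, n, "up"))
--     r = rightneighbour.get(node)
--     if r is not None:
--         pairs.append(((2 - start) % 4, 0, r, "right"))
--     for n in downneighbours.get(node, ()):
--         k = rows[rowindex - 1].index(n)
--         pairs.append(((3 - start) % 4, k if rev else -k, n, "down"))
--     pairs.sort(key=lambda t: (t[0], t[1]))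
--     return [(n, d) for _, _, n, d in pairs]
-- ===== Notes on version B (the rewrite author's own statement) =====
-- stated objective: alternative
-- what changed: Replaces A's per-segment pipeline (two separately sorted neighbour lists, four literal chain orders picked by an if/elif ladder, parallel node and label iterators zipped together) by a single keyed sort: every neighbour is tagged once with a composite clockwise key (segment offset from startdirection computed with modular arithmetic, signed within-row position) and one stable sort of that flat tagged list produces the whole clockwise order.
import Mathlib
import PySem

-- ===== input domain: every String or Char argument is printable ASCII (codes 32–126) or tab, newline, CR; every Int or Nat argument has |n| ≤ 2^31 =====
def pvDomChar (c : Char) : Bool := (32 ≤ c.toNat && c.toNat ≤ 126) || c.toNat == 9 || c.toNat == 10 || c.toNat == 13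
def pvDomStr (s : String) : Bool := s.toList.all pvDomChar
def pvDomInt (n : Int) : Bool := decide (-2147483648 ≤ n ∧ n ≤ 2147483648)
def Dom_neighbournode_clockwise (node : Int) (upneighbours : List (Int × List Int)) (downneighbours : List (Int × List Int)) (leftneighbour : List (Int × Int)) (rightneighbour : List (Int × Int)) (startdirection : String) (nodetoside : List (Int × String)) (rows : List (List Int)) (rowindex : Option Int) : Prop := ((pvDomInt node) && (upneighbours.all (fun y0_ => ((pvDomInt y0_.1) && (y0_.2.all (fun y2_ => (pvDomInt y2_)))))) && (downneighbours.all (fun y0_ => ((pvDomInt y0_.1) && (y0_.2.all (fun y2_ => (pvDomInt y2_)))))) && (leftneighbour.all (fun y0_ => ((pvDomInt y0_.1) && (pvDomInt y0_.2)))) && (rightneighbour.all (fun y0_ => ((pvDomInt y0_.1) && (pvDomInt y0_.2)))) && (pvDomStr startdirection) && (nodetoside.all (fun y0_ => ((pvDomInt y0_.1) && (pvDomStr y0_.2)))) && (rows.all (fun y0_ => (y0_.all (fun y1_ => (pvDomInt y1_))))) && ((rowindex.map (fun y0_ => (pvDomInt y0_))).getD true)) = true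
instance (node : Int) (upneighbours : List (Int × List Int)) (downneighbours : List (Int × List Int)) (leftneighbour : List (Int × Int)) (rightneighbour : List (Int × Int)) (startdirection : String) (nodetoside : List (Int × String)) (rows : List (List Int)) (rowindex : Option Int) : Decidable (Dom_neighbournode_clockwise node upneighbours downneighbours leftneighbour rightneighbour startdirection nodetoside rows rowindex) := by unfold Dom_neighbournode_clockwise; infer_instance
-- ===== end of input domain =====

-- B replaces A's per-segment sorts + four-way chain dispatch by ONE stable sort of a flat list of
-- neighbours tagged with a composite clockwise key (objective: alternative decomposition, same cost).
-- Equivalence of RETURN values only (both Pythons return iterators, compared as lists).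

-- ===== PORT A =====
-- dict .get(k) on an association list: first match (shared primitive helper)
def pvGet? {β : Type} (d : List (Int × β)) (k : Int) : Option β :=
  (d.find? (fun p => p.1 == k)).map (·.2)

def neighbournode_clockwise (node : Int) (upneighbours : List (Int × List Int)) (downneighbours : List (Int × List Int)) (leftneighbour : List (Int × Int)) (rightneighbour : List (Int × Int)) (startdirection : String) (nodetoside : List (Int × String)) (rows : List (List Int)) (rowindex : Option Int) : List (Int × String) :=
  -- rowindex = [i for i, line in enumerate(rows) if node in line][0]  ([0] = IndexError when empty, excluded by Pre_)
  let ri : Int :=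
    match rowindex with
    | some r => r
    | none => PySem.List.pyGetD (((PySem.List.enumerate rows 0).filter (fun p => decide (node ∈ p.2))).map (·.1)) 0 0
  let ups := (pvGet? upneighbours node).getD []
  let rights := match pvGet? rightneighbour node with | some r => [r] | none => []
  let downs := (pvGet? downneighbours node).getD []
  let lefts := match pvGet? leftneighbour node with | some l => [l] | none => []
  -- nodetoside[node]  (KeyError excluded by Pre_; default "" off-domain)
  let side := (pvGet? nodetoside node).getD ""
  -- key=rows[rowindex±1].index  (IndexError/ValueError excluded by Pre_; defaults off-domain)
  let upkey : Int → Int := fun u => (((PySem.List.index? (PySem.List.pyGetD rows (ri + 1) []) u).getD 0 : Nat) : Int)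
  let downkey : Int → Int := fun u => (((PySem.List.index? (PySem.List.pyGetD rows (ri - 1) []) u).getD 0 : Nat) : Int)
  let ups' := if side = "left" then (if ups ≠ [] then PySem.List.sorted ups upkey true else ups)
              else (if ups ≠ [] then PySem.List.sorted ups upkey false else ups)
  let downs' := if side = "left" then (if downs ≠ [] then PySem.List.sorted downs downkey false else downs)
                else (if downs ≠ [] then PySem.List.sorted downs downkey true else downs)
  let nodes :=
    if startdirection = "up" then lefts ++ ups' ++ rights ++ downs'
    else if startdirection = "right" then ups' ++ rights ++ downs' ++ lefts
    else if startdirection = "down" then rights ++ downs' ++ lefts ++ ups'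
    else downs' ++ lefts ++ ups' ++ rights
  let direction :=
    if startdirection = "up" then
      lefts.map (fun _ => "left") ++ ups'.map (fun _ => "up") ++ rights.map (fun _ => "right") ++ downs'.map (fun _ => "down")
    else if startdirection = "right" then
      ups'.map (fun _ => "up") ++ rights.map (fun _ => "right") ++ downs'.map (fun _ => "down") ++ lefts.map (fun _ => "left")
    else if startdirection = "down" then
      rights.map (fun _ => "right") ++ downs'.map (fun _ => "down") ++ lefts.map (fun _ => "left") ++ ups'.map (fun _ => "up")
    else
      downs'.map (fun _ => "down") ++ lefts.map (fun _ => "left") ++ ups'.map (fun _ => "up") ++ rights.map (fun _ => "right")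
  nodes.zip direction

-- ===== PORT B =====
-- rowindex = next(i for i, line in enumerate(rows) if node in line)
def pvRowIdx (node : Int) (rows : List (List Int)) (rowindex : Option Int) : Int :=
  match rowindex with
  | some r => r
  | none => (((PySem.List.enumerate rows 0).find? (fun p => decide (node ∈ p.2))).map (·.1)).getD 0

def neighbournode_clockwise_alt (node : Int) (upneighbours : List (Int × List Int)) (downneighbours : List (Int × List Int)) (leftneighbour : List (Int × Int)) (rightneighbour : List (Int × Int)) (startdirection : String) (nodetoside : List (Int × String)) (rows : List (List Int)) (rowindex : Option Int) : List (Int × String) :=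
  let ri := pvRowIdx node rows rowindex
  -- rev = nodetoside[node] == "left"  (KeyError excluded by Pre_)
  let rev : Bool := decide ((pvGet? nodetoside node).getD "" = "left")
  -- start = {"up":0,"right":1,"down":2,"left":3}[startdirection]  (KeyError excluded by Pre_)
  let start : Int := (([("up", (0:Int)), ("right", 1), ("down", 2), ("left", 3)].find? (fun p => p.1 == startdirection)).map (·.2)).getD 0
  -- k = rows[rowindex±1].index(n)  (IndexError/ValueError excluded by Pre_)
  let idxUp : Int → Int := fun u => (((PySem.List.index? (PySem.List.pyGetD rows (ri + 1) []) u).getD 0 : Nat) : Int)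
  let idxDn : Int → Int := fun u => (((PySem.List.index? (PySem.List.pyGetD rows (ri - 1) []) u).getD 0 : Nat) : Int)
  -- the append-loops building the flat tagged list: (segment offset, signed row position, node, label)
  let pairs : List (Int × Int × Int × String) :=
    (match pvGet? leftneighbour node with
     | some l => [(PySem.Int.mod (0 - start) 4, 0, l, "left")] | none => [])
    ++ ((pvGet? upneighbours node).getD []).map
        (fun n => (PySem.Int.mod (1 - start) 4, if rev then -(idxUp n) else idxUp n, n, "up"))
    ++ (match pvGet? rightneighbour node with
        | some r => [(PySem.Int.mod (2 - start) 4, 0, r, "right")] | none => [])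
    ++ ((pvGet? downneighbours node).getD []).map
        (fun n => (PySem.Int.mod (3 - start) 4, if rev then idxDn n else -(idxDn n), n, "down"))
  -- pairs.sort(key=lambda t: (t[0], t[1]))
  let sortedPairs := PySem.List.sorted2 pairs (fun t => t.1) (fun t => t.2.1)
  sortedPairs.map (fun t => (t.2.2.1, t.2.2.2))

-- ===== PRECONDITION & SPEC =====
-- Pre_ excludes exactly the inputs on which Python A raises: a startdirection outside the four
-- direction names (AssertionError), rowindex=None with node in no row (IndexError on [0]),
-- node missing from nodetoside (KeyError), and — when the respective neighbour list is nonempty —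
-- rows[rowindex±1] out of range (IndexError) or a neighbour absent from that row (ValueError in .index).
def Pre_neighbournode_clockwise (node : Int) (upneighbours : List (Int × List Int)) (downneighbours : List (Int × List Int)) (leftneighbour : List (Int × Int)) (rightneighbour : List (Int × Int)) (startdirection : String) (nodetoside : List (Int × String)) (rows : List (List Int)) (rowindex : Option Int) : Prop :=
  (startdirection = "up" ∨ startdirection = "right" ∨ startdirection = "down" ∨ startdirection = "left")
  ∧ (rowindex = none → rows.any (fun row => decide (node ∈ row)) = true)
  ∧ (pvGet? nodetoside node).isSome = true
  ∧ ((pvGet? upneighbours node).getD [] ≠ [] →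
       (PySem.List.pyGet? rows (pvRowIdx node rows rowindex + 1)).isSome = true ∧
       ∀ u ∈ (pvGet? upneighbours node).getD [], u ∈ PySem.List.pyGetD rows (pvRowIdx node rows rowindex + 1) [])
  ∧ ((pvGet? downneighbours node).getD [] ≠ [] →
       (PySem.List.pyGet? rows (pvRowIdx node rows rowindex - 1)).isSome = true ∧
       ∀ u ∈ (pvGet? downneighbours node).getD [], u ∈ PySem.List.pyGetD rows (pvRowIdx node rows rowindex - 1) [])
instance (node : Int) (upneighbours : List (Int × List Int)) (downneighbours : List (Int × List Int)) (leftneighbour : List (Int × Int)) (rightneighbour : List (Int × Int)) (startdirection : String) (nodetoside : List (Int × String)) (rows : List (List Int)) (rowindex : Option Int) : Decidable (Pre_neighbournode_clockwise node upneighbours downneighbours leftneighbour rightneighbour startdirection nodetoside rows rowindex) := by unfold Pre_neighbournode_clockwise; infer_instance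

def pvWitness_neighbournode_clockwise : Int × (List (Int × List Int)) × (List (Int × List Int)) × (List (Int × Int)) × (List (Int × Int)) × String × (List (Int × String)) × List (List Int) × Option Int :=
  (1, [(1, [4, 3])], [(1, [0])], [(1, 2)], [], "up", [(1, "left")], [[0], [2, 1], [3, 4]], none)

def Spec_neighbournode_clockwise (node : Int) (upneighbours : List (Int × List Int)) (downneighbours : List (Int × List Int)) (leftneighbour : List (Int × Int)) (rightneighbour : List (Int × Int)) (startdirection : String) (nodetoside : List (Int × String)) (rows : List (List Int)) (rowindex : Option Int) (out : List (Int × String)) : Prop := out = neighbournode_clockwise_alt node upneighbours downneighbours leftneighbour rightneighbour startdirection nodetoside rows rowindex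
instance (node : Int) (upneighbours : List (Int × List Int)) (downneighbours : List (Int × List Int)) (leftneighbour : List (Int × Int)) (rightneighbour : List (Int × Int)) (startdirection : String) (nodetoside : List (Int × String)) (rows : List (List Int)) (rowindex : Option Int) (out : List (Int × String)) : Decidable (Spec_neighbournode_clockwise node upneighbours downneighbours leftneighbour rightneighbour startdirection nodetoside rows rowindex out) := by unfold Spec_neighbournode_clockwise; infer_instance

-- ===== CLAIM (what is proved, stated in full; the proofs are below) =====
def Claim_equal_neighbournode_clockwise : Prop := ∀ (node : Int) (upneighbours : List (Int × List Int)) (downneighbours : List (Int × List Int)) (leftneighbour : List (Int × Int)) (rightneighbour : List (Int × Int)) (startdirection : String) (nodetoside : List (Int × String)) (rows : List (List Int)) (rowindex : Option Int), Dom_neighbournode_clockwise node upneighbours downneighbours leftneighbour rightneighbour startdirection nodetoside rows rowindex → Pre_neighbournode_clockwise node upneighbours downneighbours leftneighbour rightneighbour startdirection nodetoside rows rowindex → Spec_neighbournode_clockwise node upneighbours downneighbours leftneighbour rightneighbour startdirection nodetoside rows rowindex (neighbournode_clockwise node upneighbours downneighbours leftneighbour rightneighbour startdirection nodetoside rows 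rowindex)

-- ===== LEMMAS AND PROOFS =====

-- first element of a filtered list = find?
theorem head_filter_eq_find {β : Type} (l : List (Int × β)) (q : Int × β → Bool) :
    PySem.List.pyGetD ((l.filter q).map (·.1)) 0 0 = ((l.find? q).map (·.1)).getD 0 := by
  induction l with
  | nil => rfl
  | cons a t ih =>
    cases h : q a with
    | true => simp [List.find?, h]
    | false => simpa [List.filter_cons, List.find?, h] using ih

-- zip of a list with its parallel constant-label maps = the labelled pairs, segment by segment
theorem zip_const_label (xs : List Int) (s : String) :
    xs.zip (xs.map (fun _ => s)) = xs.map (fun x => (x, s)) := by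
  induction xs with
  | nil => rfl
  | cons a t ih => simp only [List.map_cons, List.zip_cons_cons, ih]

theorem zip4 (l u r d : List Int) (sl su sr sd : String) :
    (l ++ (u ++ (r ++ d))).zip
      (l.map (fun _ => sl) ++ (u.map (fun _ => su) ++ (r.map (fun _ => sr) ++ d.map (fun _ => sd))))
    = l.map (fun x => (x, sl)) ++ (u.map (fun x => (x, su)) ++ (r.map (fun x => (x, sr)) ++ d.map (fun x => (x, sd)))) := by
  rw [List.zip_append (by simp), List.zip_append (by simp), List.zip_append (by simp),
      zip_const_label, zip_const_label, zip_const_label, zip_const_label]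

-- the lexicographic "≤" that B's composite sort key induces
def lexR {α : Type} (K1 K2 : α → Int) (a b : α) : Prop :=
  K1 a < K1 b ∨ (K1 a = K1 b ∧ K2 a ≤ K2 b)

-- B's comparison function, as sorted2 uses it
def ltB {α : Type} (K1 K2 : α → Int) (a b : α) : Bool :=
  decide (K1 a < K1 b) || (!decide (K1 b < K1 a) && decide (K2 a < K2 b))

theorem sorted2_eq_foldl {α : Type} (xs : List α) (K1 K2 : α → Int) :
    PySem.List.sorted2 xs K1 K2 = xs.foldl (fun acc x => PySem.List.insertBy (ltB K1 K2) x acc) [] := rfl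

theorem ltB_true_lexR {α : Type} (K1 K2 : α → Int) {a b : α} (h : ltB K1 K2 a b = true) : lexR K1 K2 a b := by
  simp only [ltB, Bool.or_eq_true, Bool.and_eq_true, Bool.not_eq_true', decide_eq_true_eq, decide_eq_false_iff_not] at h
  unfold lexR; omega

theorem ltB_false_lexR {α : Type} (K1 K2 : α → Int) {a b : α} (h : ltB K1 K2 a b = false) : lexR K1 K2 b a := by
  simp only [ltB, Bool.or_eq_false_iff, Bool.and_eq_false_iff, Bool.not_eq_false', decide_eq_true_eq, decide_eq_false_iff_not] at h
  unfold lexR; omega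

theorem lexR_trans {α : Type} (K1 K2 : α → Int) {a b c : α}
    (h1 : lexR K1 K2 a b) (h2 : lexR K1 K2 b c) : lexR K1 K2 a c := by
  unfold lexR at *; omega

theorem insertBy_pairwise {α : Type} (K1 K2 : α → Int) (x : α) (l : List α)
    (h : l.Pairwise (lexR K1 K2)) :
    (PySem.List.insertBy (ltB K1 K2) x l).Pairwise (lexR K1 K2) := by
  induction l with
  | nil => simp [PySem.List.insertBy]
  | cons y ys ih =>
    rw [show PySem.List.insertBy (ltB K1 K2) x (y :: ys)
        = if ltB K1 K2 x y then x :: y :: ys else y :: PySem.List.insertBy (ltB K1 K2) x ys from rfl]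
    rcases List.pairwise_cons.mp h with ⟨hy, hys⟩
    by_cases hxy : ltB K1 K2 x y = true
    · simp only [hxy, if_pos]
      refine List.pairwise_cons.mpr ⟨?_, h⟩
      intro z hz
      rcases List.mem_cons.mp hz with rfl | hz
      · exact ltB_true_lexR K1 K2 hxy
      · exact lexR_trans K1 K2 (ltB_true_lexR K1 K2 hxy) (hy _ hz)
    · simp only [hxy, if_neg, Bool.false_eq_true, not_false_iff]
      refine List.pairwise_cons.mpr ⟨?_, ih hys⟩
      intro z hz
      rcases (PySem.List.mem_insertBy _ _ _ _).mp hz with rfl | hz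
      · exact ltB_false_lexR K1 K2 (Bool.eq_false_iff.mpr hxy)
      · exact hy _ hz

theorem foldl_insertBy_pairwise {α : Type} (K1 K2 : α → Int) (xs : List α) (acc : List α)
    (h : acc.Pairwise (lexR K1 K2)) :
    (xs.foldl (fun acc x => PySem.List.insertBy (ltB K1 K2) x acc) acc).Pairwise (lexR K1 K2) := by
  induction xs generalizing acc with
  | nil => simpa using h
  | cons x t ih => exact ih _ (insertBy_pairwise K1 K2 x acc h)

theorem sorted2_pairwise_lexR {α : Type} (xs : List α) (K1 K2 : α → Int) :
    (PySem.List.sorted2 xs K1 K2).Pairwise (lexR K1 K2) := by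
  rw [sorted2_eq_foldl]
  exact foldl_insertBy_pairwise K1 K2 xs [] (List.Pairwise.nil)

-- uniqueness of a sorted arrangement when key-ties are equal elements
theorem eq_of_perm_pairwise {α : Type} (r : α → α → Prop) (l₁ l₂ : List α)
    (hperm : l₁.Perm l₂) (h1 : l₁.Pairwise r) (h2 : l₂.Pairwise r)
    (hanti : ∀ a ∈ l₁, ∀ b ∈ l₁, r a b → r b a → a = b) : l₁ = l₂ := by
  induction l₁ generalizing l₂ with
  | nil => exact (List.Perm.nil_eq hperm).symm ▸ rfl
  | cons a t ih =>
    cases l₂ with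
    | nil => exact absurd hperm.symm (by simp)
    | cons b t₂ =>
      rcases List.pairwise_cons.mp h1 with ⟨ha, ht⟩
      rcases List.pairwise_cons.mp h2 with ⟨hb, ht₂⟩
      have hab : a = b := by
        by_contra hne
        have hbmem : b ∈ a :: t := hperm.mem_iff.mpr (by simp)
        have hamem : a ∈ b :: t₂ := hperm.mem_iff.mp (by simp)
        have hb_t : b ∈ t := by
          rcases List.mem_cons.mp hbmem with h | h
          · exact absurd h.symm hne
          · exact h
        have ha_t₂ : a ∈ t₂ := by
          rcases List.mem_cons.mp hamem with h | h
          · exact absurd h hne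
          · exact h
        exact hne (hanti a (by simp) b (by simp [hb_t]) (ha _ hb_t) (hb _ ha_t₂))
      subst hab
      have := ih t₂ (hperm.cons_inv) ht ht₂
        (fun x hx y hy => hanti x (by simp [hx]) y (by simp [hy]))
      rw [this]

theorem sorted2_char {α : Type} (K1 K2 : α → Int) (xs ys : List α)
    (hperm : ys.Perm xs) (hp : ys.Pairwise (lexR K1 K2))
    (hanti : ∀ a ∈ xs, ∀ b ∈ xs, K1 a = K1 b → K2 a = K2 b → a = b) :
    PySem.List.sorted2 xs K1 K2 = ys := by
  refine eq_of_perm_pairwise (lexR K1 K2) _ ys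
    ((PySem.List.sorted2_perm xs K1 K2 false).trans hperm.symm)
    (sorted2_pairwise_lexR xs K1 K2) hp ?_
  intro a ha b hb rab rba
  have ha' : a ∈ xs := (PySem.List.sorted2_perm xs K1 K2 false).mem_iff.mp ha
  have hb' : b ∈ xs := (PySem.List.sorted2_perm xs K1 K2 false).mem_iff.mp hb
  unfold lexR at rab rba
  exact hanti a ha' b hb' (by omega) (by omega)

-- sorting descending = sorting ascending by the negated key (same stable insertion)
theorem sorted_neg_key {α : Type} (xs : List α) (k : α → Int) :
    PySem.List.sorted xs (fun x => -(k x)) false = PySem.List.sorted xs k true := by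
  have h : (fun (a b : α) => decide (-(k a) < -(k b))) = fun a b => decide (k b < k a) := by
    funext a b; simp
  simp only [PySem.List.sorted, h]
  rfl

-- A's nonemptiness guard around sort is redundant
theorem sorted_guard {α κ : Type} [LT κ] [DecidableLT κ] (xs : List α) (k : α → κ) (r : Bool) :
    (if xs ≠ [] then PySem.List.sorted xs k r else xs) = PySem.List.sorted xs k r := by
  by_cases h : xs = []
  · subst h; cases r <;> rfl
  · simp [h]

-- the four clockwise blocks, offsets 0 < 1 < 2 < 3, each sorted by the second key with
-- equal-key elements equal: B's global sort returns exactly their concatenation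
theorem sorted2_four (b1 b2 b3 b4 xs : List (Int × Int × Int × String))
    (h1 : ∀ a ∈ b1, a.1 = 0) (h2 : ∀ a ∈ b2, a.1 = 1)
    (h3 : ∀ a ∈ b3, a.1 = 2) (h4 : ∀ a ∈ b4, a.1 = 3)
    (hp1 : b1.Pairwise (fun a b => a.2.1 ≤ b.2.1)) (hp2 : b2.Pairwise (fun a b => a.2.1 ≤ b.2.1))
    (hp3 : b3.Pairwise (fun a b => a.2.1 ≤ b.2.1)) (hp4 : b4.Pairwise (fun a b => a.2.1 ≤ b.2.1))
    (ha1 : ∀ a ∈ b1, ∀ b ∈ b1, a.2.1 = b.2.1 → a = b)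
    (ha2 : ∀ a ∈ b2, ∀ b ∈ b2, a.2.1 = b.2.1 → a = b)
    (ha3 : ∀ a ∈ b3, ∀ b ∈ b3, a.2.1 = b.2.1 → a = b)
    (ha4 : ∀ a ∈ b4, ∀ b ∈ b4, a.2.1 = b.2.1 → a = b)
    (hperm : (b1 ++ (b2 ++ (b3 ++ b4))).Perm xs) :
    PySem.List.sorted2 xs (fun t => t.1) (fun t => t.2.1) = b1 ++ (b2 ++ (b3 ++ b4)) := by
  refine sorted2_char _ _ xs _ hperm ?_ ?_
  · have block : ∀ (b : List (Int × Int × Int × String)) (c : Int),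
        (∀ a ∈ b, a.1 = c) → b.Pairwise (fun a b => a.2.1 ≤ b.2.1) → b.Pairwise (lexR (fun t => t.1) (fun t => t.2.1)) := by
      intro b c hc hp
      refine hp.imp_of_mem ?_
      intro a b hma hmb hab
      exact Or.inr ⟨by show a.1 = b.1; rw [hc a hma, hc b hmb], hab⟩
    refine (List.pairwise_append).mpr ⟨block b1 0 h1 hp1, (List.pairwise_append).mpr
      ⟨block b2 1 h2 hp2, (List.pairwise_append).mpr ⟨block b3 2 h3 hp3, block b4 3 h4 hp4, ?_⟩, ?_⟩, ?_⟩
    · intro a hma b hmb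
      have := h3 a hma; have := h4 b hmb
      exact Or.inl (by dsimp only; omega)
    · intro a hma b hmb
      have := h2 a hma
      rcases List.mem_append.mp hmb with hb | hb
      · have := h3 b hb; exact Or.inl (by dsimp only; omega)
      · have := h4 b hb; exact Or.inl (by dsimp only; omega)
    · intro a hma b hmb
      have := h1 a hma
      rcases List.mem_append.mp hmb with hb | hb
      · have := h2 b hb; exact Or.inl (by dsimp only; omega)
      · rcases List.mem_append.mp hb with hb | hb
        · have := h3 b hb; exact Or.inl (by dsimp only; omega)
        · have := h4 b hb; exact Or.inl (by dsimp only; omega)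
  · intro a hax b hbx hk1 hk2
    have key : ∀ x ∈ b1 ++ (b2 ++ (b3 ++ b4)),
        (x ∈ b1 ∧ x.1 = 0) ∨ (x ∈ b2 ∧ x.1 = 1) ∨ (x ∈ b3 ∧ x.1 = 2) ∨ (x ∈ b4 ∧ x.1 = 3) := by
      intro x hx
      simp only [List.mem_append] at hx
      rcases hx with hx | hx | hx | hx
      · exact Or.inl ⟨hx, h1 x hx⟩
      · exact Or.inr (Or.inl ⟨hx, h2 x hx⟩)
      · exact Or.inr (Or.inr (Or.inl ⟨hx, h3 x hx⟩))
      · exact Or.inr (Or.inr (Or.inr ⟨hx, h4 x hx⟩))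
    rcases key a (hperm.mem_iff.mpr hax) with ⟨ha', e⟩ | ⟨ha', e⟩ | ⟨ha', e⟩ | ⟨ha', e⟩ <;>
      rcases key b (hperm.mem_iff.mpr hbx) with ⟨hb', f⟩ | ⟨hb', f⟩ | ⟨hb', f⟩ | ⟨hb', f⟩ <;>
        first
          | exact ha1 a ha' b hb' hk2
          | exact ha2 a ha' b hb' hk2
          | exact ha3 a ha' b hb' hk2
          | exact ha4 a ha' b hb' hk2
          | exact False.elim (by omega)


-- list.index is injective on members of the row
theorem index_getD_inj (row : List Int) (u v : Int) (hu : u ∈ row) (hv : v ∈ row)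
    (h : (((PySem.List.index? row u).getD 0 : Nat) : Int) = (((PySem.List.index? row v).getD 0 : Nat) : Int)) : u = v := by
  obtain ⟨ku, hku⟩ := Option.isSome_iff_exists.mp ((PySem.List.index?_isSome_iff row u).mpr hu)
  obtain ⟨kv, hkv⟩ := Option.isSome_iff_exists.mp ((PySem.List.index?_isSome_iff row v).mpr hv)
  obtain ⟨hlt, hgetu, -⟩ := PySem.List.getElem_of_index?_eq_some hku
  obtain ⟨hlt', hgetv, -⟩ := PySem.List.getElem_of_index?_eq_some hkv
  rw [hku, hkv] at h
  simp only [Option.getD_some, Int.natCast_inj] at h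
  subst h
  rw [← hgetu, ← hgetv]

-- the global keyed sort of the four tagged blocks = per-segment sorts, concatenated clockwise
theorem global_sort_eq (s1 s2 s3 s4 : List Int) (k1 k2 k3 k4 : Int → Int)
    (lab1 lab2 lab3 lab4 : String)
    (hi1 : ∀ u ∈ s1, ∀ v ∈ s1, k1 u = k1 v → u = v)
    (hi2 : ∀ u ∈ s2, ∀ v ∈ s2, k2 u = k2 v → u = v)
    (hi3 : ∀ u ∈ s3, ∀ v ∈ s3, k3 u = k3 v → u = v)
    (hi4 : ∀ u ∈ s4, ∀ v ∈ s4, k4 u = k4 v → u = v)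
    (xs : List (Int × Int × Int × String))
    (hperm : (s1.map (fun n => ((0:Int), k1 n, n, lab1))
        ++ (s2.map (fun n => ((1:Int), k2 n, n, lab2))
        ++ (s3.map (fun n => ((2:Int), k3 n, n, lab3))
        ++ s4.map (fun n => ((3:Int), k4 n, n, lab4))))).Perm xs) :
    (PySem.List.sorted2 xs (fun t => t.1) (fun t => t.2.1)).map (fun t => (t.2.2.1, t.2.2.2))
      = (PySem.List.sorted s1 k1 false).map (fun n => (n, lab1))
        ++ ((PySem.List.sorted s2 k2 false).map (fun n => (n, lab2))
        ++ ((PySem.List.sorted s3 k3 false).map (fun n => (n, lab3))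
        ++ (PySem.List.sorted s4 k4 false).map (fun n => (n, lab4)))) := by
  have blockP : ∀ (s : List Int) (k : Int → Int) (o : Int) (lab : String),
      ((PySem.List.sorted s k false).map (fun n => (o, k n, n, lab))).Pairwise
        (fun a b => a.2.1 ≤ b.2.1) := by
    intro s k o lab
    rw [List.pairwise_map]
    exact PySem.List.sorted_pairwise s k
  have blockO : ∀ (s : List Int) (k : Int → Int) (o : Int) (lab : String),
      ∀ a ∈ (PySem.List.sorted s k false).map (fun n => (o, k n, n, lab)), a.1 = o := by
    intro s k o lab a ha
    rcases List.mem_map.mp ha with ⟨n, -, rfl⟩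
    rfl
  have blockA : ∀ (s : List Int) (k : Int → Int) (o : Int) (lab : String),
      (∀ u ∈ s, ∀ v ∈ s, k u = k v → u = v) →
      ∀ a ∈ (PySem.List.sorted s k false).map (fun n => (o, k n, n, lab)),
      ∀ b ∈ (PySem.List.sorted s k false).map (fun n => (o, k n, n, lab)),
      a.2.1 = b.2.1 → a = b := by
    intro s k o lab hi a ha b hb hab
    rcases List.mem_map.mp ha with ⟨n, hn, rfl⟩
    rcases List.mem_map.mp hb with ⟨m, hm, rfl⟩
    have hn' : n ∈ s := (PySem.List.mem_sorted _ _ _ _).mp hn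
    have hm' : m ∈ s := (PySem.List.mem_sorted _ _ _ _).mp hm
    have : n = m := hi n hn' m hm' hab
    subst this; rfl
  have blockPerm : ∀ (s : List Int) (k : Int → Int) (o : Int) (lab : String),
      ((PySem.List.sorted s k false).map (fun n => (o, k n, n, lab))).Perm
        (s.map (fun n => (o, k n, n, lab))) :=
    fun s k o lab => (PySem.List.sorted_perm s k false).map _
  rw [sorted2_four
      ((PySem.List.sorted s1 k1 false).map (fun n => ((0:Int), k1 n, n, lab1)))
      ((PySem.List.sorted s2 k2 false).map (fun n => ((1:Int), k2 n, n, lab2)))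
      ((PySem.List.sorted s3 k3 false).map (fun n => ((2:Int), k3 n, n, lab3)))
      ((PySem.List.sorted s4 k4 false).map (fun n => ((3:Int), k4 n, n, lab4))) xs
      (blockO s1 k1 0 lab1) (blockO s2 k2 1 lab2) (blockO s3 k3 2 lab3) (blockO s4 k4 3 lab4)
      (blockP s1 k1 0 lab1) (blockP s2 k2 1 lab2) (blockP s3 k3 2 lab3) (blockP s4 k4 3 lab4)
      (blockA s1 k1 0 lab1 hi1) (blockA s2 k2 1 lab2 hi2) (blockA s3 k3 2 lab3 hi3) (blockA s4 k4 3 lab4 hi4)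
      (((((blockPerm s1 k1 0 lab1).append
          (((blockPerm s2 k2 1 lab2).append
            (((blockPerm s3 k3 2 lab3).append (blockPerm s4 k4 3 lab4)))))))).trans hperm)]
  simp [List.map_map, Function.comp_def]


-- A's rowindex computation = B's (first filtered index = find?)
theorem riA_eq (node : Int) (rows : List (List Int)) (ri0 : Option Int) :
    (match ri0 with
     | some r => r
     | none => PySem.List.pyGetD (((PySem.List.enumerate rows 0).filter (fun p => decide (node ∈ p.2))).map (·.1)) 0 0)
    = pvRowIdx node rows ri0 := by
  cases ri0 <;> simp [pvRowIdx, head_filter_eq_find]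


theorem perm_rot1 {α : Type} (a b c d : List α) : (b ++ (c ++ (d ++ a))).Perm (a ++ (b ++ (c ++ d))) := by
  simpa [List.append_assoc] using List.perm_append_comm (l₁ := (b ++ c) ++ d) (l₂ := a)

theorem perm_rot2 {α : Type} (a b c d : List α) : (c ++ (d ++ (a ++ b))).Perm (a ++ (b ++ (c ++ d))) := by
  simpa [List.append_assoc] using List.perm_append_comm (l₁ := c ++ d) (l₂ := a ++ b)

theorem perm_rot3 {α : Type} (a b c d : List α) : (d ++ (a ++ (b ++ c))).Perm (a ++ (b ++ (c ++ d))) := by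
  simpa [List.append_assoc] using List.perm_append_comm (l₁ := d) (l₂ := (a ++ b) ++ c)

-- ===== VERDICT (by name: the statement is the Claim_ definition above) =====
theorem neighbournode_clockwise_spec : Claim_equal_neighbournode_clockwise := by
  intro node up dn lf rt sd nts rows ri0 hdom hpre
  obtain ⟨hsd, -, -, hupP, hdnP⟩ := hpre
  unfold Spec_neighbournode_clockwise neighbournode_clockwise neighbournode_clockwise_alt
  simp only [riA_eq]
  generalize hE : pvRowIdx node rows ri0 = ri at *
  have hoptInj : ∀ (o : Option Int) (k : Int → Int), ∀ u ∈ (match o with | some l => [l] | none => ([]:List Int)),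
      ∀ v ∈ (match o with | some l => [l] | none => ([]:List Int)), k u = k v → u = v := by
    rintro o k u hu v hv -
    cases o with
    | none => cases hu
    | some l => simp only [List.mem_singleton] at hu hv; rw [hu, hv]
  have hTag : ∀ (o : Option Int) (off : Int) (lab : String),
      (match o with | some l => [(off, (0:Int), l, lab)] | none => []) =
      (match o with | some l => [l] | none => ([]:List Int)).map (fun n => (off, (0:Int), n, lab)) := by
    intro o off lab; cases o <;> rfl
  have hsortO : ∀ (o : Option Int) (k : Int → Int),
      PySem.List.sorted (match o with | some l => [l] | none => ([]:List Int)) k false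
        = (match o with | some l => [l] | none => ([]:List Int)) := by
    intro o k; cases o <;> rfl
  have hUinj : ∀ u ∈ (pvGet? up node).getD [], ∀ v ∈ (pvGet? up node).getD [],
      (((PySem.List.index? (PySem.List.pyGetD rows (ri + 1) []) u).getD 0 : Nat) : Int)
        = (((PySem.List.index? (PySem.List.pyGetD rows (ri + 1) []) v).getD 0 : Nat) : Int) → u = v := by
    intro u hu v hv h
    have hne : (pvGet? up node).getD [] ≠ [] := by rintro he; rw [he] at hu; cases hu
    obtain ⟨-, hmem⟩ := hupP hne
    exact index_getD_inj _ u v (hmem u hu) (hmem v hv) h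
  have hDinj : ∀ u ∈ (pvGet? dn node).getD [], ∀ v ∈ (pvGet? dn node).getD [],
      (((PySem.List.index? (PySem.List.pyGetD rows (ri - 1) []) u).getD 0 : Nat) : Int)
        = (((PySem.List.index? (PySem.List.pyGetD rows (ri - 1) []) v).getD 0 : Nat) : Int) → u = v := by
    intro u hu v hv h
    have hne : (pvGet? dn node).getD [] ≠ [] := by rintro he; rw [he] at hu; cases hu
    obtain ⟨-, hmem⟩ := hdnP hne
    exact index_getD_inj _ u v (hmem u hu) (hmem v hv) h
  have hUneg : ∀ u ∈ (pvGet? up node).getD [], ∀ v ∈ (pvGet? up node).getD [],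
      -(((PySem.List.index? (PySem.List.pyGetD rows (ri + 1) []) u).getD 0 : Nat) : Int)
        = -(((PySem.List.index? (PySem.List.pyGetD rows (ri + 1) []) v).getD 0 : Nat) : Int) → u = v :=
    fun u hu v hv h => hUinj u hu v hv (by omega)
  have hDneg : ∀ u ∈ (pvGet? dn node).getD [], ∀ v ∈ (pvGet? dn node).getD [],
      -(((PySem.List.index? (PySem.List.pyGetD rows (ri - 1) []) u).getD 0 : Nat) : Int)
        = -(((PySem.List.index? (PySem.List.pyGetD rows (ri - 1) []) v).getD 0 : Nat) : Int) → u = v :=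
    fun u hu v hv h => hDinj u hu v hv (by omega)
  rcases hsd with rfl | rfl | rfl | rfl
  · by_cases hside : (pvGet? nts node).getD "" = "left"
    · simp only [String.reduceEq, hside, decide_true, if_true, if_false, sorted_guard]
      simp only [show ((([("up", (0:Int)), ("right", 1), ("down", 2), ("left", 3)].find? (fun p => p.1 == "up")).map (·.2)).getD 0) = (0:Int) from by decide, show PySem.Int.mod (0 - 0) 4 = 0 from by decide, show PySem.Int.mod (1 - 0) 4 = 1 from by decide, show PySem.Int.mod (2 - 0) 4 = 2 from by decide, show PySem.Int.mod (3 - 0) 4 = 3 from by decide, hTag, List.append_assoc]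
      rw [zip4]
      rw [← sorted_neg_key ((pvGet? up node).getD []) (fun u => (((PySem.List.index? (PySem.List.pyGetD rows (ri + 1) []) u).getD 0 : Nat) : Int))]
      rw [global_sort_eq (match pvGet? lf node with | some l => [l] | none => []) ((pvGet? up node).getD []) (match pvGet? rt node with | some l => [l] | none => []) ((pvGet? dn node).getD []) (fun _ => (0:Int)) (fun n => -(((PySem.List.index? (PySem.List.pyGetD rows (ri + 1) []) n).getD 0 : Nat) : Int)) (fun _ => (0:Int)) (fun n => (((PySem.List.index? (PySem.List.pyGetD rows (ri - 1) []) n).getD 0 : Nat) : Int)) "left" "up" "right" "down" (hoptInj _ _) hUneg (hoptInj _ _) hDinj _ (List.Perm.refl _)]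
      simp only [hsortO]
    · simp only [String.reduceEq, if_neg hside, decide_eq_false hside, Bool.false_eq_true, if_true, if_false, sorted_guard]
      simp only [show ((([("up", (0:Int)), ("right", 1), ("down", 2), ("left", 3)].find? (fun p => p.1 == "up")).map (·.2)).getD 0) = (0:Int) from by decide, show PySem.Int.mod (0 - 0) 4 = 0 from by decide, show PySem.Int.mod (1 - 0) 4 = 1 from by decide, show PySem.Int.mod (2 - 0) 4 = 2 from by decide, show PySem.Int.mod (3 - 0) 4 = 3 from by decide, hTag, List.append_assoc]
      rw [zip4]
      rw [← sorted_neg_key ((pvGet? dn node).getD []) (fun u => (((PySem.List.index? (PySem.List.pyGetD rows (ri - 1) []) u).getD 0 : Nat) : Int))]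
      rw [global_sort_eq (match pvGet? lf node with | some l => [l] | none => []) ((pvGet? up node).getD []) (match pvGet? rt node with | some l => [l] | none => []) ((pvGet? dn node).getD []) (fun _ => (0:Int)) (fun n => (((PySem.List.index? (PySem.List.pyGetD rows (ri + 1) []) n).getD 0 : Nat) : Int)) (fun _ => (0:Int)) (fun n => -(((PySem.List.index? (PySem.List.pyGetD rows (ri - 1) []) n).getD 0 : Nat) : Int)) "left" "up" "right" "down" (hoptInj _ _) hUinj (hoptInj _ _) hDneg _ (List.Perm.refl _)]
      simp only [hsortO]
  · by_cases hside : (pvGet? nts node).getD "" = "left"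
    · simp only [String.reduceEq, hside, decide_true, if_true, if_false, sorted_guard]
      simp only [show ((([("up", (0:Int)), ("right", 1), ("down", 2), ("left", 3)].find? (fun p => p.1 == "right")).map (·.2)).getD 0) = (1:Int) from by decide, show PySem.Int.mod (0 - 1) 4 = 3 from by decide, show PySem.Int.mod (1 - 1) 4 = 0 from by decide, show PySem.Int.mod (2 - 1) 4 = 1 from by decide, show PySem.Int.mod (3 - 1) 4 = 2 from by decide, hTag, List.append_assoc]
      rw [zip4]
      rw [← sorted_neg_key ((pvGet? up node).getD []) (fun u => (((PySem.List.index? (PySem.List.pyGetD rows (ri + 1) []) u).getD 0 : Nat) : Int))]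
      rw [global_sort_eq ((pvGet? up node).getD []) (match pvGet? rt node with | some l => [l] | none => []) ((pvGet? dn node).getD []) (match pvGet? lf node with | some l => [l] | none => []) (fun n => -(((PySem.List.index? (PySem.List.pyGetD rows (ri + 1) []) n).getD 0 : Nat) : Int)) (fun _ => (0:Int)) (fun n => (((PySem.List.index? (PySem.List.pyGetD rows (ri - 1) []) n).getD 0 : Nat) : Int)) (fun _ => (0:Int)) "up" "right" "down" "left" hUneg (hoptInj _ _) hDinj (hoptInj _ _) _ (perm_rot1 _ _ _ _)]
      simp only [hsortO]
    · simp only [String.reduceEq, if_neg hside, decide_eq_false hside, Bool.false_eq_true, if_true, if_false, sorted_guard]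
      simp only [show ((([("up", (0:Int)), ("right", 1), ("down", 2), ("left", 3)].find? (fun p => p.1 == "right")).map (·.2)).getD 0) = (1:Int) from by decide, show PySem.Int.mod (0 - 1) 4 = 3 from by decide, show PySem.Int.mod (1 - 1) 4 = 0 from by decide, show PySem.Int.mod (2 - 1) 4 = 1 from by decide, show PySem.Int.mod (3 - 1) 4 = 2 from by decide, hTag, List.append_assoc]
      rw [zip4]
      rw [← sorted_neg_key ((pvGet? dn node).getD []) (fun u => (((PySem.List.index? (PySem.List.pyGetD rows (ri - 1) []) u).getD 0 : Nat) : Int))]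
      rw [global_sort_eq ((pvGet? up node).getD []) (match pvGet? rt node with | some l => [l] | none => []) ((pvGet? dn node).getD []) (match pvGet? lf node with | some l => [l] | none => []) (fun n => (((PySem.List.index? (PySem.List.pyGetD rows (ri + 1) []) n).getD 0 : Nat) : Int)) (fun _ => (0:Int)) (fun n => -(((PySem.List.index? (PySem.List.pyGetD rows (ri - 1) []) n).getD 0 : Nat) : Int)) (fun _ => (0:Int)) "up" "right" "down" "left" hUinj (hoptInj _ _) hDneg (hoptInj _ _) _ (perm_rot1 _ _ _ _)]
      simp only [hsortO]
  · by_cases hside : (pvGet? nts node).getD "" = "left"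
    · simp only [String.reduceEq, hside, decide_true, if_true, if_false, sorted_guard]
      simp only [show ((([("up", (0:Int)), ("right", 1), ("down", 2), ("left", 3)].find? (fun p => p.1 == "down")).map (·.2)).getD 0) = (2:Int) from by decide, show PySem.Int.mod (0 - 2) 4 = 2 from by decide, show PySem.Int.mod (1 - 2) 4 = 3 from by decide, show PySem.Int.mod (2 - 2) 4 = 0 from by decide, show PySem.Int.mod (3 - 2) 4 = 1 from by decide, hTag, List.append_assoc]
      rw [zip4]
      rw [← sorted_neg_key ((pvGet? up node).getD []) (fun u => (((PySem.List.index? (PySem.List.pyGetD rows (ri + 1) []) u).getD 0 : Nat) : Int))]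
      rw [global_sort_eq (match pvGet? rt node with | some l => [l] | none => []) ((pvGet? dn node).getD []) (match pvGet? lf node with | some l => [l] | none => []) ((pvGet? up node).getD []) (fun _ => (0:Int)) (fun n => (((PySem.List.index? (PySem.List.pyGetD rows (ri - 1) []) n).getD 0 : Nat) : Int)) (fun _ => (0:Int)) (fun n => -(((PySem.List.index? (PySem.List.pyGetD rows (ri + 1) []) n).getD 0 : Nat) : Int)) "right" "down" "left" "up" (hoptInj _ _) hDinj (hoptInj _ _) hUneg _ (perm_rot2 _ _ _ _)]
      simp only [hsortO]
    · simp only [String.reduceEq, if_neg hside, decide_eq_false hside, Bool.false_eq_true, if_true, if_false, sorted_guard]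
      simp only [show ((([("up", (0:Int)), ("right", 1), ("down", 2), ("left", 3)].find? (fun p => p.1 == "down")).map (·.2)).getD 0) = (2:Int) from by decide, show PySem.Int.mod (0 - 2) 4 = 2 from by decide, show PySem.Int.mod (1 - 2) 4 = 3 from by decide, show PySem.Int.mod (2 - 2) 4 = 0 from by decide, show PySem.Int.mod (3 - 2) 4 = 1 from by decide, hTag, List.append_assoc]
      rw [zip4]
      rw [← sorted_neg_key ((pvGet? dn node).getD []) (fun u => (((PySem.List.index? (PySem.List.pyGetD rows (ri - 1) []) u).getD 0 : Nat) : Int))]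
      rw [global_sort_eq (match pvGet? rt node with | some l => [l] | none => []) ((pvGet? dn node).getD []) (match pvGet? lf node with | some l => [l] | none => []) ((pvGet? up node).getD []) (fun _ => (0:Int)) (fun n => -(((PySem.List.index? (PySem.List.pyGetD rows (ri - 1) []) n).getD 0 : Nat) : Int)) (fun _ => (0:Int)) (fun n => (((PySem.List.index? (PySem.List.pyGetD rows (ri + 1) []) n).getD 0 : Nat) : Int)) "right" "down" "left" "up" (hoptInj _ _) hDneg (hoptInj _ _) hUinj _ (perm_rot2 _ _ _ _)]
      simp only [hsortO]
  · by_cases hside : (pvGet? nts node).getD "" = "left"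
    · simp only [String.reduceEq, hside, decide_true, if_true, if_false, sorted_guard]
      simp only [show ((([("up", (0:Int)), ("right", 1), ("down", 2), ("left", 3)].find? (fun p => p.1 == "left")).map (·.2)).getD 0) = (3:Int) from by decide, show PySem.Int.mod (0 - 3) 4 = 1 from by decide, show PySem.Int.mod (1 - 3) 4 = 2 from by decide, show PySem.Int.mod (2 - 3) 4 = 3 from by decide, show PySem.Int.mod (3 - 3) 4 = 0 from by decide, hTag, List.append_assoc]
      rw [zip4]
      rw [← sorted_neg_key ((pvGet? up node).getD []) (fun u => (((PySem.List.index? (PySem.List.pyGetD rows (ri + 1) []) u).getD 0 : Nat) : Int))]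
      rw [global_sort_eq ((pvGet? dn node).getD []) (match pvGet? lf node with | some l => [l] | none => []) ((pvGet? up node).getD []) (match pvGet? rt node with | some l => [l] | none => []) (fun n => (((PySem.List.index? (PySem.List.pyGetD rows (ri - 1) []) n).getD 0 : Nat) : Int)) (fun _ => (0:Int)) (fun n => -(((PySem.List.index? (PySem.List.pyGetD rows (ri + 1) []) n).getD 0 : Nat) : Int)) (fun _ => (0:Int)) "down" "left" "up" "right" hDinj (hoptInj _ _) hUneg (hoptInj _ _) _ (perm_rot3 _ _ _ _)]
      simp only [hsortO]
    · simp only [String.reduceEq, if_neg hside, decide_eq_false hside, Bool.false_eq_true, if_true, if_false, sorted_guard]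
      simp only [show ((([("up", (0:Int)), ("right", 1), ("down", 2), ("left", 3)].find? (fun p => p.1 == "left")).map (·.2)).getD 0) = (3:Int) from by decide, show PySem.Int.mod (0 - 3) 4 = 1 from by decide, show PySem.Int.mod (1 - 3) 4 = 2 from by decide, show PySem.Int.mod (2 - 3) 4 = 3 from by decide, show PySem.Int.mod (3 - 3) 4 = 0 from by decide, hTag, List.append_assoc]
      rw [zip4]
      rw [← sorted_neg_key ((pvGet? dn node).getD []) (fun u => (((PySem.List.index? (PySem.List.pyGetD rows (ri - 1) []) u).getD 0 : Nat) : Int))]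
      rw [global_sort_eq ((pvGet? dn node).getD []) (match pvGet? lf node with | some l => [l] | none => []) ((pvGet? up node).getD []) (match pvGet? rt node with | some l => [l] | none => []) (fun n => -(((PySem.List.index? (PySem.List.pyGetD rows (ri - 1) []) n).getD 0 : Nat) : Int)) (fun _ => (0:Int)) (fun n => (((PySem.List.index? (PySem.List.pyGetD rows (ri + 1) []) n).getD 0 : Nat) : Int)) (fun _ => (0:Int)) "down" "left" "up" "right" hDneg (hoptInj _ _) hUinj (hoptInj _ _) _ (perm_rot3 _ _ _ _)]
      simp only [hsortO]
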